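-- pv_equiv track=rewrite | github.com/YulingShen/1783codecAssignment | codec/encoder/entropy_encode.py | entropy_encode_quan_frame_block
-- ===== SOURCE A (Python) =====
-- def entropy_encode_quan_frame_block(quan_frame_block):
--     n_h = len(quan_frame_block)
--     n_w = len(quan_frame_block[0])
--     block_size = len(quan_frame_block[0][0])
--     coded_string = ""
--     bit_sum = 0
--     for i in range(n_h):
--         for j in range(n_w):
--             block = quan_frame_block[i][j]
--             num_array = []
--             for xy_sum in range(block_size * 2 - 1):
--                 for x in range(max(0, xy_sum - block_size + 1), min(xy_sum + 1, block_size)):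
--                     y = xy_sum - x
--                     num_array.append(block[x][y])
--             rle_array = RLE(num_array)
--             for each in rle_array:
--                 code, bits = exp_golomb(each)
--                 coded_string = coded_string + code
--                 bit_sum = bit_sum + bits
--     return coded_string, bit_sum
--
-- def RLE(num_array):
--     count = 0
--     count_index = 0
--     result = []
--     if num_array[0] == 0:
--         zero = False
--     else:
--         zero = True
--     for each in num_array:
--         if zero and each != 0:
--             if count != 0:
--                 result[count_index] = count
--             count_index = len(result)
--             result.append(0)
--             zero = False
--             count = 0
--         elif not zero and each == 0:
--             if count != 0:
--                 result[count_index] = -count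
--             count_index = len(result)
--             result.append(0)
--             zero = True
--             count = 0
--         if not zero:
--             result.append(each)
--         count += 1
--     if count != 0 and not zero:
--         result[count_index] = -count
--     return result
--
-- def exp_golomb(val):
--     if val <= 0:
--         rep = abs(val) * 2
--     else:
--         rep = val * 2 - 1
--     sec_half = bin(rep + 1)[2:]
--     fst_half = "0" * (len(sec_half) - 1)
--     return fst_half + sec_half, 2 * len(sec_half) - 1
-- ===== SOURCE B (Python) =====
-- def _exp_golomb(val):
--     if val <= 0:
--         rep = abs(val) * 2
--     else:
--         rep = val * 2 - 1
--     sec_half = format(rep + 1, 'b')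
--     return "0" * (len(sec_half) - 1) + sec_half, 2 * len(sec_half) - 1
--
--
-- def _runs(nums):
--     """Split nums into maximal runs of zeros / non-zeros: list of (is_zero, values)."""
--     runs = []
--     i = 0
--     n = len(nums)
--     while i < n:
--         z = nums[i] == 0
--         j = i
--         while j < n and (nums[j] == 0) == z:
--             j += 1
--         runs.append((z, nums[i:j]))
--         i = j
--     return runs
--
--
-- def _rle_from_runs(runs):
--     """Zero run -> its length (0 if it is the final run); non-zero run -> -length followed by the values."""
--     out = []
--     last = len(runs) - 1
--     for idx, (z, vals) in enumerate(runs):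
--         if z:
--             out.append(len(vals) if idx < last else 0)
--         else:
--             out.append(-len(vals))
--             out.extend(vals)
--     return out
--
--
-- def entropy_encode_quan_frame_block(quan_frame_block):
--     n_h = len(quan_frame_block)
--     n_w = len(quan_frame_block[0])
--     block_size = len(quan_frame_block[0][0])
--     codes = []
--     bit_sum = 0
--     for i in range(n_h):
--         for j in range(n_w):
--             block = quan_frame_block[i][j]
--             nums = []
--             for xy_sum in range(block_size * 2 - 1):
--                 for x in range(max(0, xy_sum - block_size + 1), min(xy_sum + 1, block_size)):
--                     nums.append(block[x][xy_sum - x])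
--             for sym in _rle_from_runs(_runs(nums)):
--                 code, bits = _exp_golomb(sym)
--                 codes.append(code)
--                 bit_sum += bits
--     return "".join(codes), bit_sum
-- ===== Notes on version B (the rewrite author's own statement) =====
-- stated objective: alternative
-- what changed: A's stateful single-pass RLE (mode flag, placeholder rewrite via result[count_index], end-of-loop flush) is replaced by an explicit split of the zigzag sequence into maximal zero/non-zero runs with a per-run emitter (zero run -> its length, 0 if final; non-zero run -> -length then the values), and the output string is accumulated as a list of codes joined once instead of repeated string concatenation.
import Mathlib
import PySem

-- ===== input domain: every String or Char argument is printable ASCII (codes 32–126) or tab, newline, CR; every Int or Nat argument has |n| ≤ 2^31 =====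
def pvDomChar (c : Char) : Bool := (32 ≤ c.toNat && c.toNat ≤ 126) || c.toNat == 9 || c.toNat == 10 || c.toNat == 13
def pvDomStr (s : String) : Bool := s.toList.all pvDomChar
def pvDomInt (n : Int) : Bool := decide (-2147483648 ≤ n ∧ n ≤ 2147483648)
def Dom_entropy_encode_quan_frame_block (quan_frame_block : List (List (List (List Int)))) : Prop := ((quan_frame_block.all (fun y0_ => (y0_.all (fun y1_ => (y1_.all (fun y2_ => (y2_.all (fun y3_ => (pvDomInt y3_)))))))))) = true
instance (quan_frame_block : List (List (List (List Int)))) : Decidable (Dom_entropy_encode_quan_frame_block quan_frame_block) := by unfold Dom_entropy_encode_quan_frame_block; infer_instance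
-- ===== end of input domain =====

-- B replaces A's stateful run-length loop by an explicit split into maximal zero/non-zero runs
-- (emitted per run, with A's sign/last-run conventions) and joins the codes once at the end.

-- ===== PORT A =====

-- exp_golomb: rep + 1 ≥ 1 always, so bin(rep+1)[2:] is exactly its binary digits (PySem.Int.toBinChars).
def expGolombA (val : Int) : String × Int :=
  let rep : Int := if val ≤ 0 then |val| * 2 else val * 2 - 1
  let sec_half : List Char := PySem.Int.toBinChars (rep + 1)
  let fst_half : List Char := List.replicate (sec_half.length - 1) '0'
  (String.ofList (fst_half ++ sec_half), 2 * (sec_half.length : Int) - 1)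

-- the 'for each in num_array' loop of RLE, state (count, count_index, result, zero);
-- in the transition branches Python sets count = 0 and then runs count += 1 at the bottom, hence the 1.
def rleLoopA : List Int → Int → Nat → List Int → Bool → List Int
  | [], count, count_index, result, zero =>
    if count ≠ 0 ∧ zero = false then result.set count_index (-count) else result
  | e :: t, count, count_index, result, zero =>
    if zero = true ∧ e ≠ 0 then
      let result1 := if count ≠ 0 then result.set count_index count else result
      -- count_index = len(result); append placeholder 0; zero = False, so 'result.append(each)' fires
      rleLoopA t 1 result1.length ((result1 ++ [0]) ++ [e]) false
    else if zero = false ∧ e = 0 then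
      let result1 := if count ≠ 0 then result.set count_index (-count) else result
      rleLoopA t 1 result1.length (result1 ++ [0]) true
    else if zero = false then
      rleLoopA t (count + 1) count_index (result ++ [e]) zero
    else
      rleLoopA t (count + 1) count_index result zero

def RLE_A (num_array : List Int) : List Int :=
  match num_array with
  | [] => []  -- Python raises IndexError on num_array[0] here; unreachable under Pre_ (block_size ≥ 1)
  | h :: _ => rleLoopA num_array 0 0 [] (h != 0)

-- the zig-zag double loop building num_array (shared shape of both Pythons, kept as a named helper)
def zigzagNums (block : List (List Int)) (block_size : Int) : List Int :=
  (PySem.List.pyRange 0 (block_size * 2 - 1) 1).foldl (fun na xy_sum =>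
    (PySem.List.pyRange (max 0 (xy_sum - block_size + 1)) (min (xy_sum + 1) block_size) 1).foldl
      (fun na x => na ++ [PySem.List.pyGetD (PySem.List.pyGetD block x []) (xy_sum - x) 0]) na) []

def entropy_encode_quan_frame_block (quan_frame_block : List (List (List (List Int)))) : String × Int :=
  let n_h : Int := quan_frame_block.length
  let n_w : Int := (PySem.List.pyGetD quan_frame_block 0 []).length
  let block_size : Int := ((PySem.List.pyGetD (PySem.List.pyGetD quan_frame_block 0 []) 0 []).length : Int)
  (PySem.List.pyRange 0 n_h 1).foldl (fun st i =>
    (PySem.List.pyRange 0 n_w 1).foldl (fun st j =>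
      let block := PySem.List.pyGetD (PySem.List.pyGetD quan_frame_block i []) j []
      (RLE_A (zigzagNums block block_size)).foldl (fun st each =>
        ((st.1 ++ (expGolombA each).1, st.2 + (expGolombA each).2) : String × Int)) st) st)
    (("", 0) : String × Int)

-- ===== PORT B =====

def expGolombB (val : Int) : String × Int :=
  let rep : Int := if val ≤ 0 then |val| * 2 else val * 2 - 1
  let sec_half : List Char := PySem.Int.toBinChars (rep + 1)
  let fst_half : List Char := List.replicate (sec_half.length - 1) '0'
  (String.ofList (fst_half ++ sec_half), 2 * (sec_half.length : Int) - 1)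

-- _runs: the outer while loop is recursion on the remaining suffix, the inner while is takeWhile/dropWhile
def runsB : List Int → List (Bool × List Int)
  | [] => []
  | e :: t =>
    let z : Bool := e == 0
    (z, e :: t.takeWhile (fun x => (x == 0) == z)) :: runsB (t.dropWhile (fun x => (x == 0) == z))
termination_by l => l.length
decreasing_by simpa [Nat.lt_succ_iff] using List.length_dropWhile_le _ t

-- _rle_from_runs: the enumerate loop; 'idx < last' is exactly 'rest is nonempty'
def rleFromRunsB : List (Bool × List Int) → List Int
  | [] => []
  | (z, vals) :: rest =>
    (if z then [if rest.isEmpty then (0 : Int) else (vals.length : Int)]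
     else (-(vals.length : Int)) :: vals) ++ rleFromRunsB rest

def zigzagNumsB (block : List (List Int)) (block_size : Int) : List Int :=
  (PySem.List.pyRange 0 (block_size * 2 - 1) 1).foldl (fun na xy_sum =>
    (PySem.List.pyRange (max 0 (xy_sum - block_size + 1)) (min (xy_sum + 1) block_size) 1).foldl
      (fun na x => na ++ [PySem.List.pyGetD (PySem.List.pyGetD block x []) (xy_sum - x) 0]) na) []

def entropy_encode_quan_frame_block_alt (quan_frame_block : List (List (List (List Int)))) : String × Int :=
  let n_h : Int := quan_frame_block.length
  let n_w : Int := (PySem.List.pyGetD quan_frame_block 0 []).length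
  let block_size : Int := ((PySem.List.pyGetD (PySem.List.pyGetD quan_frame_block 0 []) 0 []).length : Int)
  let r :=
    (PySem.List.pyRange 0 n_h 1).foldl (fun st i =>
      (PySem.List.pyRange 0 n_w 1).foldl (fun st j =>
        let block := PySem.List.pyGetD (PySem.List.pyGetD quan_frame_block i []) j []
        (rleFromRunsB (runsB (zigzagNumsB block block_size))).foldl (fun st sym =>
          ((st.1 ++ [(expGolombB sym).1], st.2 + (expGolombB sym).2) : List String × Int)) st) st)
      (([], 0) : List String × Int)
  (PySem.Str.join "" r.1, r.2)

-- ===== PRECONDITION & SPEC =====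
-- Pre_ excludes exactly the inputs on which the Python A raises IndexError: an empty frame, an empty
-- first row, an empty first block row (block_size = 0 makes RLE index into an empty list), or a ragged
-- input (a row shorter than the first row, or an accessed block narrower than block_size × block_size).
def Pre_entropy_encode_quan_frame_block (quan_frame_block : List (List (List (List Int)))) : Prop :=
  quan_frame_block ≠ [] ∧
  quan_frame_block.headD [] ≠ [] ∧
  (quan_frame_block.headD []).headD [] ≠ [] ∧
  (∀ r ∈ quan_frame_block,
    (quan_frame_block.headD []).length ≤ r.length ∧
    ∀ blk ∈ r.take (quan_frame_block.headD []).length,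
      ((quan_frame_block.headD []).headD []).length ≤ blk.length ∧
      ∀ row ∈ blk.take ((quan_frame_block.headD []).headD []).length,
        ((quan_frame_block.headD []).headD []).length ≤ row.length)
instance (quan_frame_block : List (List (List (List Int)))) : Decidable (Pre_entropy_encode_quan_frame_block quan_frame_block) := by unfold Pre_entropy_encode_quan_frame_block; infer_instance

def pvWitness_entropy_encode_quan_frame_block : List (List (List (List Int))) := [[[[1, 0], [0, 3]]]]

def Spec_entropy_encode_quan_frame_block (quan_frame_block : List (List (List (List Int)))) (out : String × Int) : Prop := out = entropy_encode_quan_frame_block_alt quan_frame_block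
instance (quan_frame_block : List (List (List (List Int)))) (out : String × Int) : Decidable (Spec_entropy_encode_quan_frame_block quan_frame_block out) := by unfold Spec_entropy_encode_quan_frame_block; infer_instance

-- ===== CLAIM (what is proved, stated in full; the proofs are below) =====
def Claim_equal_entropy_encode_quan_frame_block : Prop := ∀ (quan_frame_block : List (List (List (List Int)))), Dom_entropy_encode_quan_frame_block quan_frame_block → Pre_entropy_encode_quan_frame_block quan_frame_block → Spec_entropy_encode_quan_frame_block quan_frame_block (entropy_encode_quan_frame_block quan_frame_block)

-- ===== LEMMAS AND PROOFS =====

-- ---- the RLE bridge: A's loop ↔ run-by-run emission ----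

-- run-boundary normal forms of A's loop: zEmit c t = output after a zero run of c elements so far,
-- nEmit t vals = output after a non-zero run with values vals so far (placeholder still 0 in res).
mutual
def zEmit (c : Int) : List Int → List Int
  | [] => [0]
  | e :: t => if e = 0 then zEmit (c + 1) t else c :: nEmit t [e]
  termination_by l => l.length
def nEmit : List Int → List Int → List Int
  | [], vals => (-(vals.length : Int)) :: vals
  | e :: t, vals => if e = 0 then ((-(vals.length : Int)) :: vals) ++ zEmit 1 t else nEmit t (vals ++ [e])
  termination_by l _ => l.length
end

lemma runsB_nil : runsB [] = [] := by rw [runsB.eq_def]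

lemma runsB_cons (e : Int) (t : List Int) :
    runsB (e :: t) =
      ((e == 0), e :: t.takeWhile (fun x => (x == 0) == (e == 0))) ::
        runsB (t.dropWhile (fun x => (x == 0) == (e == 0))) := by
  rw [runsB.eq_def]

lemma set_mid (pre : List Int) (a : Int) (s : List Int) (x : Int) :
    (pre ++ a :: s).set pre.length x = pre ++ x :: s := by
  simp

lemma loop_emit : ∀ l : List Int,
    (∀ (c : Int) (pre : List Int), 0 < c →
      rleLoopA l c pre.length (pre ++ [0]) true = pre ++ zEmit c l) ∧
    (∀ (vals pre : List Int), vals ≠ [] →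
      rleLoopA l (vals.length : Int) pre.length (pre ++ 0 :: vals) false = pre ++ nEmit l vals) := by
  intro l
  induction l with
  | nil =>
    constructor
    · intro c pre _
      simp [rleLoopA, zEmit]
    · intro vals pre hv
      have hlen : ((vals.length : Int)) ≠ 0 := by
        have := List.length_pos_of_ne_nil hv; omega
      simp only [rleLoopA]
      rw [if_pos (by simpa using hv), set_mid]
      simp [nEmit]
  | cons e t ih =>
    constructor
    · intro c pre hc
      have hcne : c ≠ 0 := by omega
      by_cases he : e = 0
      · subst he
        simp only [rleLoopA]
        rw [if_neg (by simp), if_neg (by simp), if_neg (by simp)]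
        rw [ih.1 (c + 1) pre (by omega)]
        simp [zEmit]
      · simp only [rleLoopA]
        rw [if_pos (by simp [he]), if_pos hcne, set_mid pre 0 [] c]
        have h5 := ih.2 [e] (pre ++ [c]) (by simp)
        simp at h5 ⊢
        rw [h5]
        simp [zEmit, he]
    · intro vals pre hv
      have hlen : ((vals.length : Int)) ≠ 0 := by
        have := List.length_pos_of_ne_nil hv; omega
      by_cases he : e = 0
      · subst he
        simp only [rleLoopA]
        rw [if_neg (by simp), if_pos (by simp), if_pos hlen, set_mid]
        have h5 := ih.1 1 (pre ++ (-(vals.length : Int)) :: vals) (by omega)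
        simp at h5 ⊢
        rw [h5]
        simp [nEmit]
      · simp only [rleLoopA]
        rw [if_neg (by simp), if_neg (by simp [he]), if_pos (by simp)]
        have h5 := ih.2 (vals ++ [e]) pre (by simp)
        simp at h5 ⊢
        rw [h5]
        simp [nEmit, he]

lemma emit_runs : ∀ t : List Int,
    (∀ (c : Int) (zs : List Int),
      ((zs.length : Int)) = c + (((t.takeWhile (fun x => (x == 0) == true)).length : Int)) →
      zEmit c t = rleFromRunsB ((true, zs) :: runsB (t.dropWhile (fun x => (x == 0) == true)))) ∧
    (∀ vals : List Int,
      nEmit t vals = rleFromRunsB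
        ((false, vals ++ t.takeWhile (fun x => (x == 0) == false)) ::
          runsB (t.dropWhile (fun x => (x == 0) == false)))) := by
  intro t
  induction t with
  | nil =>
    constructor
    · intro c zs _
      simp [zEmit, runsB_nil, rleFromRunsB]
    · intro vals
      simp [nEmit, runsB_nil, rleFromRunsB]
  | cons e t ih =>
    constructor
    · intro c zs hzs
      by_cases he : e = 0
      · subst he
        have hl : zEmit c ((0 : Int) :: t) = zEmit (c + 1) t := by simp [zEmit]
        have hd : List.dropWhile (fun x => ((x == 0) == true : Bool)) ((0 : Int) :: t)
            = List.dropWhile (fun x => ((x == 0) == true : Bool)) t := by simp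
        rw [hl, hd]
        refine ih.1 (c + 1) zs ?_
        simp only [List.takeWhile_cons, show (((0 : Int) == 0) == true : Bool) = true from rfl,
          if_true, List.length_cons] at hzs
        push_cast at hzs ⊢
        omega
      · have hz : ((e == 0) : Bool) = false := by simp [he]
        have hl : zEmit c (e :: t) = c :: nEmit t [e] := by simp [zEmit, he]
        have hd : List.dropWhile (fun x => ((x == 0) == true : Bool)) (e :: t) = e :: t := by
          simp [hz]
        have hc : ((zs.length : Int)) = c := by
          simp only [List.takeWhile_cons, hz] at hzs
          simpa using hzs
        rw [hl, hd, runsB_cons, hz]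
        have h6 := ih.2 [e]
        simp only [List.cons_append, List.nil_append] at h6
        conv_rhs => rw [rleFromRunsB]
        rw [← h6, ← hc]
        simp
    · intro vals
      by_cases he : e = 0
      · subst he
        have hl : nEmit ((0 : Int) :: t) vals = ((-(vals.length : Int)) :: vals) ++ zEmit 1 t := by
          simp [nEmit]
        have ht : List.takeWhile (fun x => ((x == 0) == false : Bool)) ((0 : Int) :: t) = [] := by
          simp
        have hd : List.dropWhile (fun x => ((x == 0) == false : Bool)) ((0 : Int) :: t)
            = (0 : Int) :: t := by simp
        rw [hl, ht, hd, List.append_nil, runsB_cons]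
        simp only [show (((0 : Int) == 0) : Bool) = true from rfl]
        conv_rhs => rw [rleFromRunsB]
        simp only [Bool.false_eq_true, if_false]
        rw [← ih.1 1 ((0 : Int) :: List.takeWhile (fun x => ((x == 0) == true : Bool)) t)
          (by simp only [List.length_cons]; omega)]
      · have hz : ((e == 0) : Bool) = false := by simp [he]
        have hl : nEmit (e :: t) vals = nEmit t (vals ++ [e]) := by simp [nEmit, he]
        have ht : List.takeWhile (fun x => ((x == 0) == false : Bool)) (e :: t)
            = e :: List.takeWhile (fun x => ((x == 0) == false : Bool)) t := by
          simp [hz]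
        have hd : List.dropWhile (fun x => ((x == 0) == false : Bool)) (e :: t)
            = List.dropWhile (fun x => ((x == 0) == false : Bool)) t := by
          simp [hz]
        rw [hl, ht, hd, ih.2 (vals ++ [e])]
        simp

lemma rle_eq (num : List Int) (h : num ≠ []) : RLE_A num = rleFromRunsB (runsB num) := by
  match num with
  | e :: t =>
    by_cases he : e = 0
    · subst he
      have lhs : RLE_A ((0 : Int) :: t) = zEmit 1 t := by
        rw [RLE_A]
        have step : rleLoopA ((0 : Int) :: t) 0 0 [] (((0 : Int) != 0)) = rleLoopA t 1 0 [0] true := by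
          simp [rleLoopA]
        rw [step]
        have h5 := (loop_emit t).1 1 [] (by omega)
        simpa using h5
      rw [lhs, runsB_cons]
      simp only [show (((0 : Int) == 0) : Bool) = true from rfl]
      refine (emit_runs t).1 1 ((0 : Int) :: List.takeWhile (fun x => ((x == 0) == true : Bool)) t) ?_
      simp only [List.length_cons]; omega
    · have hz : ((e == 0) : Bool) = false := by simp [he]
      have lhs : RLE_A (e :: t) = nEmit t [e] := by
        rw [RLE_A]
        have hzero : ((e != 0) : Bool) = true := by simp [he]
        rw [hzero]
        have step : rleLoopA (e :: t) 0 0 [] true = rleLoopA t 1 0 [0, e] false := by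
          simp only [rleLoopA]
          split_ifs <;> first | rfl | simp_all
        rw [step]
        have h5 := (loop_emit t).2 [e] [] (by simp)
        simpa using h5
      rw [lhs, runsB_cons, hz]
      have h5 := (emit_runs t).2 [e]
      simpa using h5

-- ---- zig-zag: nonemptiness (the only fact needed about it) ----

lemma zig_flat (block : List (List Int)) (bs : Int) :
    zigzagNums block bs =
      (PySem.List.pyRange 0 (bs * 2 - 1) 1).flatMap (fun s =>
        (PySem.List.pyRange (max 0 (s - bs + 1)) (min (s + 1) bs) 1).map
          (fun x => PySem.List.pyGetD (PySem.List.pyGetD block x []) (s - x) 0)) := by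
  unfold zigzagNums
  simp only [PySem.List.foldl_append_singleton_eq_map]
  rw [PySem.List.foldl_append_eq_flatMap]
  simp

lemma zig_ne (block : List (List Int)) (bs : Int) (h : 0 < bs) : zigzagNums block bs ≠ [] := by
  rw [zig_flat]
  rw [PySem.List.pyRange_one_cons (by omega : (0 : Int) < bs * 2 - 1)]
  rw [List.flatMap_cons]
  have h1 : max 0 ((0 : Int) - bs + 1) = 0 := by omega
  have h2 : min ((0 : Int) + 1) bs = 1 := by omega
  rw [h1, h2]
  have h3 : PySem.List.pyRange 0 1 1 = [0] := by
    simpa using PySem.List.pyRange_one_singleton (a := 0)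
  rw [h3]
  simp

lemma zigB_eq : zigzagNumsB = zigzagNums := rfl
lemma golombB_eq : expGolombB = expGolombA := rfl

-- ---- string accumulation: repeated append = join at the end ----

lemma charsJoinNilCons (p : List Char) (rest : List (List Char)) :
    PySem.Chars.join [] (p :: rest) = p ++ PySem.Chars.join [] rest := by
  cases rest with
  | nil => simp [PySem.Chars.join_singleton, PySem.Chars.join_nil]
  | cons q r => simp [PySem.Chars.join_cons_cons]

lemma joinNilCons (c : String) (cs : List String) :
    PySem.Str.join "" (c :: cs) = c ++ PySem.Str.join "" cs := by
  rw [← String.toList_inj]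
  simp [PySem.Str.toList_join, String.toList_append, charsJoinNilCons]

lemma joinNilNil : PySem.Str.join "" ([] : List String) = "" := by
  rw [← String.toList_inj]
  simp [PySem.Str.toList_join, PySem.Chars.join_nil]

lemma strfold (f : Int → String) : ∀ (l : List Int) (s : String),
    l.foldl (fun a e => a ++ f e) s = s ++ PySem.Str.join "" (l.map f) := by
  intro l
  induction l with
  | nil => intro s; simp [joinNilNil]
  | cons e t ih =>
    intro s
    simp only [List.foldl_cons, List.map_cons]
    rw [ih (s ++ f e), joinNilCons, String.append_assoc]

-- ---- nested loops flattened ----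

lemma double_fold {σ : Type} (I J : List Int) (g : σ → Int → σ) (syms : Int → Int → List Int)
    (init : σ) :
    I.foldl (fun st i => J.foldl (fun st j => (syms i j).foldl g st) st) init
      = (I.flatMap (fun i => J.flatMap (fun j => syms i j))).foldl g init := by
  simp [List.foldl_flatMap]

lemma final_fold (syms : List Int) :
    syms.foldl (fun st e => ((st.1 ++ (expGolombA e).1, st.2 + (expGolombA e).2) : String × Int))
        (("", 0) : String × Int)
      = (PySem.Str.join ""
          ((syms.foldl (fun st e =>
              ((st.1 ++ [(expGolombA e).1], st.2 + (expGolombA e).2) : List String × Int))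
            (([], 0) : List String × Int)).1),
         (syms.foldl (fun st e =>
              ((st.1 ++ [(expGolombA e).1], st.2 + (expGolombA e).2) : List String × Int))
            (([], 0) : List String × Int)).2) := by
  rw [PySem.List.foldl_prod_mk (f := fun (s : String) e => s ++ (expGolombA e).1)
    (g := fun (b : Int) e => b + (expGolombA e).2) syms "" 0]
  rw [PySem.List.foldl_prod_mk (f := fun (cs : List String) e => cs ++ [(expGolombA e).1])
    (g := fun (b : Int) e => b + (expGolombA e).2) syms [] 0]
  rw [PySem.List.foldl_append_singleton_eq_map (f := fun e => (expGolombA e).1)]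
  rw [strfold (fun e => (expGolombA e).1)]
  simp

-- ===== VERDICT (by name: the statement is the Claim_ definition above) =====
theorem entropy_encode_quan_frame_block_spec : Claim_equal_entropy_encode_quan_frame_block := by
  intro q _ hpre
  obtain ⟨hq, hr0, hb00, _⟩ := hpre
  unfold Spec_entropy_encode_quan_frame_block
  have hbs : (0 : Int) < ((PySem.List.pyGetD (PySem.List.pyGetD q 0 []) 0 []).length : Int) := by
    match q, hq with
    | r0 :: qs, _ =>
      match r0, hr0 with
      | b00 :: r0s, _ =>
        simp only [List.headD_cons] at hb00
        simp only [PySem.List.pyGetD_zero_cons]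
        have := List.length_pos_of_ne_nil hb00
        exact_mod_cast this
  have hsyms : ∀ (i j : Int),
      rleFromRunsB (runsB (zigzagNums (PySem.List.pyGetD (PySem.List.pyGetD q i []) j [])
        ((PySem.List.pyGetD (PySem.List.pyGetD q 0 []) 0 []).length : Int)))
      = RLE_A (zigzagNums (PySem.List.pyGetD (PySem.List.pyGetD q i []) j [])
        ((PySem.List.pyGetD (PySem.List.pyGetD q 0 []) 0 []).length : Int)) := by
    intro i j
    exact (rle_eq _ (zig_ne _ _ hbs)).symm
  simp only [entropy_encode_quan_frame_block, entropy_encode_quan_frame_block_alt,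
    zigB_eq, golombB_eq]
  rw [double_fold, double_fold]
  simp only [hsyms]
  exact final_fold _
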